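-- pv_equiv track=rewrite | github.com/plc1220/Spot-Spraying-path-planning | Slicing.py | zigzag
-- ===== SOURCE A (Python) =====
-- def zigzag(di):
--     layer = []
--     row = len(di)
--     for i in range(row):
--         x = len(di[i])
--         layer.append(x)
--
--     col = max(layer)
--     a = [x1+[0]*(col - len(x1)) for x1 in di]
--
--     evenRow = 0
--     oddRow = 1
--     index = []
--     while evenRow < row:
--         for i in range(col):
--             x = (a[evenRow][i])
--             index.append(x)
--         evenRow = evenRow + 2
--
--         if oddRow < row:
--             for i in range(col - 1, -1, -1):
--                 x = (a[oddRow][i])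
--                 index.append(x)
--         oddRow = oddRow + 2
--
--     while(i<len(index)):
--         if(index[i]==0):
--             index.remove(index[i])
--             col = col -1
--             continue
--         i = i+1
--
--     index = [x - 1 for x in index]
--     index = list(dict.fromkeys(index))
--     return index
-- ===== SOURCE B (Python) =====
-- def zigzag(di):
--     # Flatten the padded grid boustrophedon-style in one pass, then drop zeros,
--     # subtract 1 and deduplicate on the fly with a set.
--     col = max(len(r) for r in di)
--     flat = []
--     for r, row in enumerate(di):
--         padded = row + [0] * (col - len(row))
--         flat.extend(padded if r % 2 == 0 else padded[::-1])
--     out = []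
--     seen = set()
--     for x in flat:
--         if x != 0 and x - 1 not in seen:
--             seen.add(x - 1)
--             out.append(x - 1)
--     return out
-- ===== Notes on version B (the rewrite author's own statement) =====
-- stated objective: faster
-- what changed: Replaces the quadratic while-loop that repeatedly calls list.remove on zeros (plus separate map and dict.fromkeys passes) with a single linear pass that flattens, drops zeros, subtracts 1 and deduplicates via a set on the fly; Pre_ excludes only di = [], where A raises ValueError (max of empty sequence) and B raises too.
-- intended difference: When di has an odd number of rows and the padded first row has a zero among its first col-1 entries, A's zero-removal loop starts at the stale loop index left over from the flattening loops and so leaves that many zeros in, returning a list containing -1; B removes every zero, which is the evident intent of the loop. — e.g. on zigzag([[1, 0, 2], [3], [0, 4, 5]]): A returns [0, 1, 2, -1, 3, 4], B returns [0, 1, 2, 3, 4]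
import Mathlib
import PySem

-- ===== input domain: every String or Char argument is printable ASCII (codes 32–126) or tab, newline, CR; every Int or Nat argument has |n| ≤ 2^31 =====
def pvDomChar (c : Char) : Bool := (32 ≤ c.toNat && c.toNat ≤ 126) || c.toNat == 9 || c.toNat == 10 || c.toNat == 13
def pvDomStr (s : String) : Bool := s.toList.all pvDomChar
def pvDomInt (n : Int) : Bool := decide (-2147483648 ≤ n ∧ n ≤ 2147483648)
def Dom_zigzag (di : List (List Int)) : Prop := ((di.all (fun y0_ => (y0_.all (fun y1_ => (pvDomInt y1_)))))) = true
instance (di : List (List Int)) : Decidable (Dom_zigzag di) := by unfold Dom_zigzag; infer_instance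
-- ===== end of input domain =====

-- B flattens the padded grid boustrophedon-style in one linear pass, drops zeros, subtracts 1
-- and deduplicates with a set on the fly, replacing A's quadratic repeated list.remove loop.


-- ===== PORT A =====
-- helper cited by zigzagRm's termination proof
theorem pv_remove_length {xs ys : List Int} (h : PySem.List.remove? xs (0:Int) = some ys) :
    ys.length < xs.length := by
  have h0 : (0:Int) ∈ xs := by
    by_contra hm
    rw [(PySem.List.remove?_eq_none_iff xs 0).2 hm] at h; cases h
  rw [PySem.List.remove?_eq_some_erase xs 0 h0] at h
  cases h
  have := List.length_erase_of_mem h0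
  have : 0 < xs.length := List.length_pos_of_mem h0
  omega

-- while(i < len(index)): if index[i] == 0: index.remove(index[i]); continue else i += 1
-- (A's `col = col - 1` inside this loop is dead state: col is never read afterwards;
--  i is always a nonnegative value when this loop is reached, so it is a Nat)
def zigzagRm (index : List Int) (i : Nat) : List Int :=
  if h : i < index.length then
    if index[i] = 0 then
      match hr : PySem.List.remove? index (0:Int) with
      | some index' => zigzagRm index' i
      | none => index        -- unreachable: index[i] = 0 ∈ index
    else zigzagRm index (i + 1)
  else index
termination_by index.length - i
decreasing_by
  · have := pv_remove_length hr; omega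
  · omega

-- while evenRow < row: the two for-loops appending a[r][i]; iv is Python's loop variable i
def zigzagWhile (row : Nat) (col : Int) (a : List (List Int)) (evenRow oddRow : Nat)
    (index : List Int) (iv : Option Int) : List Int × Option Int :=
  if evenRow < row then
    let s1 := (PySem.List.pyRange 0 col 1).foldl
      (fun (st : List Int × Option Int) j =>
        (st.1 ++ [PySem.List.pyGetD (PySem.List.pyGetD a (evenRow : Int) []) j 0], some j))
      (index, iv)
    let s2 := if oddRow < row then
      (PySem.List.pyRange (col - 1) (-1) (-1)).foldl
        (fun (st : List Int × Option Int) j =>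
          (st.1 ++ [PySem.List.pyGetD (PySem.List.pyGetD a (oddRow : Int) []) j 0], some j))
        s1
      else s1
    zigzagWhile row col a (evenRow + 2) (oddRow + 2) s2.1 s2.2
  else (index, iv)
termination_by row - evenRow
decreasing_by omega

def zigzag (di : List (List Int)) : List Int :=
  let row := di.length
  -- first loop: for i in range(row): layer.append(len(di[i]))  — it also assigns i
  let st0 := (PySem.List.pyRange 0 (row : Int) 1).foldl
    (fun (st : List Int × Option Int) i =>
      (st.1 ++ [((PySem.List.pyGetD di i []).length : Int)], some i)) ([], none)
  let layer := st0.1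
  let col := (PySem.List.max? layer (fun x => x)).getD 0     -- max(layer); di = [] raises ValueError, excluded by Pre_
  let a := di.map (fun x1 => x1 ++ PySem.List.pyRepeat [(0:Int)] (col - (x1.length : Int)))
  match zigzagWhile row col a 0 1 [] st0.2 with
  | (index, some i) =>
      let index := zigzagRm index i.toNat     -- i nonnegative here
      let index := index.map (fun x => x - 1)
      PySem.List.dedup index
  | (_, none) => []                           -- only reachable for di = [], excluded by Pre_

-- ===== PORT B =====
def zigzag_alt (di : List (List Int)) : List Int :=
  let col := (PySem.List.max? (di.map (fun r => (r.length : Int))) (fun x => x)).getD 0   -- di = [] raises, excluded by Pre_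
  let flat := di.zipIdx.foldl
    (fun (acc : List Int) (p : List Int × Nat) =>
      let padded := p.1 ++ PySem.List.pyRepeat [(0:Int)] (col - (p.1.length : Int))
      acc ++ (if p.2 % 2 = 0 then padded else padded.reverse)) []
  (flat.foldl
    (fun (st : PySem.Set Int × List Int) x =>
      if x ≠ 0 ∧ (x - 1) ∉ st.1 then (PySem.Set.add st.1 (x - 1), st.2 ++ [x - 1]) else st)
    (PySem.Set.empty, [])).2

-- ===== PRECONDITION & SPEC =====
-- A raises ValueError (max of an empty sequence) exactly when di = []; Pre_ excludes only that.
def Pre_zigzag (di : List (List Int)) : Prop := di ≠ []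
instance (di : List (List Int)) : Decidable (Pre_zigzag di) := by unfold Pre_zigzag; infer_instance
def pvWitness_zigzag : List (List Int) := [[1, 2], [3]]

-- the maximum row length (Python's col), a plain fold over the input's shape
def pvColN (di : List (List Int)) : Nat := di.foldr (fun r acc => max r.length acc) 0

-- When di has an odd number of rows and the padded first row has a zero among its first
-- col-1 entries, A's removal loop starts at a stale leftover index and leaves that many
-- zeros in, so its output contains -1; B removes every zero, which is the evident intent.
def D_zigzag (di : List (List Int)) : Prop :=
  di.length % 2 = 1 ∧
  ((0:Int) ∈ (di.headD []).take (pvColN di - 1) ∨ (di.headD []).length + 1 < pvColN di)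
instance (di : List (List Int)) : Decidable (D_zigzag di) := by unfold D_zigzag; infer_instance

def Spec_zigzag (di : List (List Int)) (out : List Int) : Prop := ¬ D_zigzag di → out = zigzag_alt di
instance (di : List (List Int)) (out : List Int) : Decidable (Spec_zigzag di out) := by unfold Spec_zigzag; infer_instance

def pvDiffWitness_zigzag : List (List Int) := [[1, 0, 2], [3], [0, 4, 5]]
def pvDiffWitnessOut_zigzag : (List Int) × (List Int) := ([0, 1, 2, -1, 3, 4], [0, 1, 2, 3, 4])

-- ===== CLAIM (what is proved, stated in full; the proofs are below) =====
def Claim_unchanged_zigzag : Prop := ∀ (di : List (List Int)), Dom_zigzag di → Pre_zigzag di → Spec_zigzag di (zigzag di)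
def Claim_changed_zigzag : Prop := Dom_zigzag (pvDiffWitness_zigzag) ∧ Pre_zigzag (pvDiffWitness_zigzag) ∧ D_zigzag (pvDiffWitness_zigzag) ∧ zigzag (pvDiffWitness_zigzag) = pvDiffWitnessOut_zigzag.1 ∧ zigzag_alt (pvDiffWitness_zigzag) = pvDiffWitnessOut_zigzag.2 ∧ pvDiffWitnessOut_zigzag.1 ≠ pvDiffWitnessOut_zigzag.2
def Claim_exact_zigzag : Prop := ∀ (di : List (List Int)), Dom_zigzag di → Pre_zigzag di → D_zigzag di → zigzag di ≠ zigzag_alt di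

-- ===== LEMMAS AND PROOFS =====

-- canonical boustrophedon flattening of a list of (already padded) rows
def pvZZ : List (List Int) → List Int
  | [] => []
  | [r] => r
  | r1 :: r2 :: rest => r1 ++ r2.reverse ++ pvZZ rest

-- remove the k leftmost zeros (what A's removal loop does)
def pvErase : Nat → List Int → List Int
  | 0, l => l
  | k + 1, l => pvErase k (l.erase 0)

def pvPad (m : Int) (r : List Int) : List Int := r ++ PySem.List.pyRepeat [(0:Int)] (m - (r.length : Int))
def pvF (di : List (List Int)) : List Int := pvZZ (di.map (pvPad ((pvColN di : Int))))
def pvI0 (di : List (List Int)) : Nat := if di.length % 2 = 0 then 0 else pvColN di - 1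
def pvK (di : List (List Int)) : Nat := ((pvF di).drop (pvI0 di)).count 0

theorem pv_lastFold (l : List Int) (b : Option Int) :
    l.foldl (fun _ j => some j) b = l.getLast?.or b := by
  induction l using List.reverseRecOn with
  | nil => rfl
  | append_singleton t x ih => simp [List.foldl_append]

theorem pv_drop_erase (L : List Int) : ∀ i (h : i < L.length), L[i] = 0 →
    (L.erase 0).drop i = L.drop (i + 1) := by
  induction L with
  | nil => intro i h; simp at h
  | cons x t ih =>
    intro i h hz
    by_cases hx : x = 0
    · subst hx; simp [List.erase_cons_head]
    · have hi : i ≠ 0 := by rintro rfl; exact hx hz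
      obtain ⟨j, rfl⟩ := Nat.exists_eq_succ_of_ne_zero hi
      rw [List.erase_cons_tail (by simpa using hx)]
      simp only [List.drop_succ_cons]
      exact ih j (by simpa using h) (by simpa using hz)

theorem pv_rm_spec (L : List Int) (i : Nat) :
    zigzagRm L i = pvErase ((L.drop i).count 0) L := by
  induction L, i using zigzagRm.induct with
  | case1 L i h hz L' hr ih =>
    have hm : (0:Int) ∈ L := hz ▸ List.getElem_mem h
    have hL' : L' = L.erase 0 := by
      rw [PySem.List.remove?_eq_some_erase L 0 hm] at hr; exact (Option.some.inj hr).symm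
    rw [zigzagRm]
    simp only [dif_pos h, if_pos hz]
    split
    case _ L2 hr2 =>
      rw [hr2] at hr
      cases hr
      rw [ih, hL', pv_drop_erase L i h hz]
      have hcnt : (L.drop i).count 0 = (L.drop (i+1)).count 0 + 1 := by
        rw [List.drop_eq_getElem_cons h, hz, List.count_cons_self]
      rw [hcnt]
      rfl
    case _ hr2 =>
      rw [hr2] at hr; cases hr
  | case2 L i h hz hr =>
    have hm : (0:Int) ∈ L := hz ▸ List.getElem_mem h
    rw [PySem.List.remove?_eq_some_erase L 0 hm] at hr; cases hr
  | case3 L i h hz ih =>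
    rw [zigzagRm]
    simp only [dif_pos h, if_neg hz]
    rw [ih]
    congr 1
    rw [List.drop_eq_getElem_cons h, List.count_cons_of_ne (by simpa using hz)]
  | case4 L i h =>
    rw [zigzagRm]
    simp only [dif_neg h]
    rw [List.drop_eq_nil_of_le (by omega)]
    rfl

theorem pv_erase_cons (x : Int) (hx : x ≠ 0) : ∀ (k : Nat) (l : List Int),
    k ≤ l.count 0 → pvErase k (x :: l) = x :: pvErase k l := by
  intro k
  induction k with
  | zero => intro l _; rfl
  | succ m ih =>
    intro l hk
    have hm : (0:Int) ∈ l := by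
      by_contra hn
      rw [List.count_eq_zero_of_not_mem hn] at hk; omega
    show pvErase m ((x :: l).erase 0) = x :: pvErase m (l.erase 0)
    rw [List.erase_cons_tail (by simpa using hx)]
    exact ih (l.erase 0) (by rw [List.count_erase_self]; omega)

theorem pvErase_all : ∀ (l : List Int), pvErase (l.count 0) l = l.filter (fun x => decide (x ≠ 0)) := by
  intro l
  induction l with
  | nil => rfl
  | cons x t ih =>
    by_cases hx : x = 0
    · subst hx
      rw [List.count_cons_self]
      show pvErase (t.count 0) ((0 :: t).erase 0) = _
      rw [List.erase_cons_head, ih]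
      simp
    · rw [List.count_cons_of_ne (by simpa using hx),
        pv_erase_cons x hx (t.count 0) t le_rfl, ih]
      simp [hx]

theorem pvErase_count : ∀ (k : Nat) (l : List Int), k ≤ l.count 0 →
    (pvErase k l).count 0 = l.count 0 - k := by
  intro k
  induction k with
  | zero => intro l _; rfl
  | succ m ih =>
    intro l hk
    show (pvErase m (l.erase 0)).count 0 = _
    rw [ih (l.erase 0) (by rw [List.count_erase_self]; omega), List.count_erase_self]
    omega

theorem pvErase_nil (k : Nat) : pvErase k [] = [] := by
  induction k with
  | zero => rfl
  | succ m ih => exact ih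

-- B's dedupe loop, with seen-set and output identical lists
theorem pv_foldB : ∀ (L : List Int) (s : List Int),
    (L.foldl (fun (st : PySem.Set Int × List Int) x =>
      if x ≠ 0 ∧ (x - 1) ∉ st.1 then (PySem.Set.add st.1 (x - 1), st.2 ++ [x - 1]) else st)
      (s, s)).2
    = ((L.filter (fun x => decide (x ≠ 0))).map (fun x => x - 1)).foldl PySem.Set.add s := by
  intro L
  induction L with
  | nil => intro s; rfl
  | cons x t ih =>
    intro s
    rw [List.foldl_cons]
    by_cases hx : x = 0
    · rw [if_neg (by simp [hx]), ih]
      simp [hx]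
    · by_cases hs : (x - 1) ∈ s
      · rw [if_neg (by simp [hs]), ih]
        have hsame : PySem.Set.add s (x - 1) = s := by simp [PySem.Set.add, PySem.Set.contains, hs]
        rw [List.filter_cons_of_pos (by simpa using hx), List.map_cons, List.foldl_cons, hsame]
      · rw [if_pos ⟨hx, hs⟩]
        have hadd : PySem.Set.add s (x - 1) = s ++ [x - 1] := by
          simp [PySem.Set.add, PySem.Set.contains, hs]
        rw [show (PySem.Set.add s (x - 1), s ++ [x - 1])
            = ((s ++ [x-1] : List Int), (s ++ [x-1] : List Int)) by rw [hadd], ih]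
        rw [List.filter_cons_of_pos (by simpa using hx), List.map_cons, List.foldl_cons, hadd]

-- one inner for-loop: append a whole (padded) row, leave iv = last range value
theorem pv_rowFold (r : List Int) (a : List (List Int)) (e : Nat) (he : e < a.length)
    (her : a[e] = r) (col : Int) (hc : col = (r.length : Int)) (hcol1 : 1 ≤ col)
    (index : List Int) (iv : Option Int) :
    (PySem.List.pyRange 0 col 1).foldl
      (fun (st : List Int × Option Int) j =>
        (st.1 ++ [PySem.List.pyGetD (PySem.List.pyGetD a (e : Int) []) j 0], some j))
      (index, iv) = (index ++ r, some (col - 1)) := by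
  have hrow : PySem.List.pyGetD a (e : Int) [] = r := by
    rw [PySem.List.pyGetD_natCast, List.getD_eq_getElem a [] he, her]
  rw [PySem.List.foldl_prod_mk
    (f := fun acc j => acc ++ [PySem.List.pyGetD (PySem.List.pyGetD a (e : Int) []) j 0])
    (g := fun _ j => some j)]
  rw [PySem.List.foldl_append_singleton_eq_map, pv_lastFold]
  have h1 : (PySem.List.pyRange 0 col 1).map
      (fun j => PySem.List.pyGetD (PySem.List.pyGetD a (e : Int) []) j 0) = r := by
    rw [hrow, hc]
    exact PySem.List.map_pyGetD_pyRange_zero r 0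
  have h2 : (PySem.List.pyRange 0 col 1).getLast? = some (col - 1) := by
    have : col = (col - 1) + 1 := by ring
    rw [this, PySem.List.pyRange_one_succ_right (by omega)]
    simp
  rw [h1, h2]
  rfl

theorem pv_rowFoldRev (r : List Int) (a : List (List Int)) (o : Nat) (ho : o < a.length)
    (her : a[o] = r) (col : Int) (hc : col = (r.length : Int)) (hcol1 : 1 ≤ col)
    (index : List Int) (iv : Option Int) :
    (PySem.List.pyRange (col - 1) (-1) (-1)).foldl
      (fun (st : List Int × Option Int) j =>
        (st.1 ++ [PySem.List.pyGetD (PySem.List.pyGetD a (o : Int) []) j 0], some j))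
      (index, iv) = (index ++ r.reverse, some 0) := by
  have hrow : PySem.List.pyGetD a (o : Int) [] = r := by
    rw [PySem.List.pyGetD_natCast, List.getD_eq_getElem a [] ho, her]
  have hrng : PySem.List.pyRange (col - 1) (-1) (-1) = (PySem.List.pyRange 0 col 1).reverse := by
    rw [PySem.List.pyRange_neg_one_eq_reverse]
    norm_num
  rw [hrng, PySem.List.foldl_prod_mk
    (f := fun acc j => acc ++ [PySem.List.pyGetD (PySem.List.pyGetD a (o : Int) []) j 0])
    (g := fun _ j => some j)]
  rw [PySem.List.foldl_append_singleton_eq_map, pv_lastFold]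
  have h1 : (PySem.List.pyRange 0 col 1).reverse.map
      (fun j => PySem.List.pyGetD (PySem.List.pyGetD a (o : Int) []) j 0) = r.reverse := by
    rw [List.map_reverse, hrow, hc]
    exact congrArg List.reverse (PySem.List.map_pyGetD_pyRange_zero r 0)
  have h2 : (PySem.List.pyRange 0 col 1).reverse.getLast? = some 0 := by
    rw [List.getLast?_reverse, PySem.List.pyRange_one_cons (by omega)]
    rfl
  rw [h1, h2]
  rfl

theorem pv_whileA (a : List (List Int)) (col : Int) (hcol1 : 1 ≤ col)
    (hlen : ∀ r ∈ a, (r.length : Int) = col) :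
    ∀ (n e : Nat), a.length - e = n → ∀ (index : List Int) (iv : Option Int),
    zigzagWhile a.length col a e (e + 1) index iv =
      (index ++ pvZZ (a.drop e),
       if e < a.length then some (if (a.length - e) % 2 = 0 then 0 else col - 1) else iv) := by
  intro n
  induction n using Nat.strong_induction_on with
  | _ n ih =>
    intro e hn index iv
    rw [zigzagWhile]
    by_cases he : e < a.length
    · rw [if_pos he]
      have hE := pv_rowFold a[e] a e he rfl col (hlen a[e] (List.getElem_mem he)).symm hcol1 index iv
      by_cases ho : e + 1 < a.length
      · have hO := pv_rowFoldRev a[e+1] a (e+1) ho rfl col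
          (hlen a[e+1] (List.getElem_mem ho)).symm hcol1 (index ++ a[e]) (some (col - 1))
        simp only [if_pos ho, hE, hO]
        have hrec := ih (a.length - (e + 2)) (by omega) (e + 2) rfl
          (index ++ a[e] ++ a[e+1].reverse) (some 0)
        have : e + 1 + 2 = e + 2 + 1 := by omega
        rw [this, hrec]
        have hdrop : a.drop e = a[e] :: a[e+1] :: a.drop (e + 2) := by
          rw [List.drop_eq_getElem_cons he, List.drop_eq_getElem_cons ho]
        rw [hdrop]
        simp only [pvZZ, Prod.mk.injEq]
        constructor
        · simp [List.append_assoc]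
        · rw [if_pos he]
          by_cases h2 : e + 2 < a.length
          · have hpar : (a.length - (e + 2)) % 2 = (a.length - e) % 2 := by omega
            rw [if_pos h2, hpar]
          · have hpar : (a.length - e) % 2 = 0 := by omega
            rw [if_neg h2, hpar]
            rfl
      · simp only [if_neg ho, hE]
        have hrec := ih (a.length - (e + 2)) (by omega) (e + 2) rfl (index ++ a[e]) (some (col - 1))
        have : e + 1 + 2 = e + 2 + 1 := by omega
        rw [this, hrec]
        have hlen2 : a.length = e + 1 := by omega
        have hdrop : a.drop e = [a[e]] := by
          rw [List.drop_eq_getElem_cons he, List.drop_eq_nil_of_le (by omega)]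
        rw [if_neg (by omega), hdrop]
        have : pvZZ [a[e]] = a[e] := rfl
        rw [this, if_pos he, hlen2]
        rw [List.drop_eq_nil_of_le (by omega)]
        norm_num
        rfl
    · rw [if_neg he, List.drop_eq_nil_of_le (by omega)]
      rw [if_neg he]
      show (index, iv) = (index ++ pvZZ [], iv)
      simp [pvZZ]

-- col = 0: both inner ranges are empty, the while loop changes nothing
theorem pv_while_col0 (a : List (List Int)) (row : Nat) :
    ∀ (n e o : Nat) (index : List Int) (iv : Option Int), row - e = n →
    zigzagWhile row 0 a e o index iv = (index, iv) := by
  intro n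
  induction n using Nat.strong_induction_on with
  | _ n ih =>
    intro e o index iv hn
    rw [zigzagWhile]
    by_cases he : e < row
    · rw [if_pos he]
      rw [PySem.List.pyRange_one_eq_nil le_rfl]
      have h2 : PySem.List.pyRange ((0:Int) - 1) (-1) (-1) = [] :=
        PySem.List.pyRange_neg_one_eq_nil (by norm_num)
      rw [h2]
      simp only [List.foldl_nil]
      split
      · exact ih (row - (e + 2)) (by omega) (e + 2) (o + 2) index iv rfl
      · exact ih (row - (e + 2)) (by omega) (e + 2) (o + 2) index iv rfl
    · rw [if_neg he]

theorem pv_foldB_flat (f : List Int → List Int) :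
    ∀ (l : List (List Int)) (n : Nat), n % 2 = 0 → ∀ (acc : List Int),
    (l.zipIdx n).foldl (fun (acc : List Int) (p : List Int × Nat) =>
        acc ++ (if p.2 % 2 = 0 then f p.1 else (f p.1).reverse)) acc
    = acc ++ pvZZ (l.map f) := by
  intro l
  induction l using pvZZ.induct with
  | case1 => intro n hn acc; simp [pvZZ]
  | case2 r =>
    intro n hn acc
    simp [List.zipIdx, hn, pvZZ]
  | case3 r1 r2 rest ih =>
    intro n hn acc
    rw [List.zipIdx_cons, List.zipIdx_cons, List.foldl_cons, List.foldl_cons]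
    have h1 : (n + 1) % 2 ≠ 0 := by omega
    rw [if_pos hn, if_neg h1, ih (n + 2) (by omega)]
    show _ = acc ++ (f r1 ++ (f r2).reverse ++ pvZZ (rest.map f))
    simp [List.append_assoc]

theorem pv_layer (di : List (List Int)) :
    (PySem.List.pyRange 0 (di.length : Int) 1).foldl
      (fun acc i => acc ++ [((PySem.List.pyGetD di i []).length : Int)]) []
    = di.map (fun r => (r.length : Int)) := by
  rw [PySem.List.foldl_append_singleton_eq_map, List.nil_append]
  have h : (fun i => ((PySem.List.pyGetD di i []).length : Int))
      = (fun r : List Int => (r.length : Int)) ∘ (fun i => PySem.List.pyGetD di i []) := rfl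
  rw [h, ← List.map_map]
  congr 1
  exact PySem.List.map_pyGetD_pyRange_zero di []

theorem pv_colN_ub (di : List (List Int)) : ∀ r ∈ di, r.length ≤ pvColN di := by
  induction di with
  | nil => intro r hr; cases hr
  | cons x t ih =>
    intro r hr
    have hc : pvColN (x :: t) = max x.length (pvColN t) := rfl
    rw [hc]
    rcases List.mem_cons.1 hr with rfl | hr
    · omega
    · have := ih r hr; omega

theorem pv_colN_le (m : Int) : ∀ (l : List (List Int)), 0 ≤ m →
    (∀ r ∈ l, (r.length : Int) ≤ m) → ((pvColN l : Int)) ≤ m := by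
  intro l
  induction l with
  | nil => intro h0 _; simpa [pvColN]
  | cons x t ih =>
    intro h0 hub
    have h1 := hub x (by simp)
    have h2 := ih h0 (fun r hr => hub r (by simp [hr]))
    show ((max x.length (pvColN t) : Nat) : Int) ≤ m
    push_cast
    omega

theorem pv_max_eq (di : List (List Int)) (h : di ≠ []) :
    PySem.List.max? (di.map (fun r => (r.length : Int))) (fun x => x) = some ((pvColN di : Int)) := by
  cases hmx : PySem.List.max? (di.map (fun r => (r.length : Int))) (fun x => x) with
  | none => exact absurd (by simpa using (PySem.List.max?_eq_none_iff ..).1 hmx) h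
  | some m =>
    have hmem := PySem.List.max?_mem hmx
    obtain ⟨r', hr', hm⟩ := List.mem_map.1 hmem
    have hub : ∀ r ∈ di, (r.length : Int) ≤ m := by
      intro r hr
      exact PySem.List.max?_isMax hmx _ (List.mem_map_of_mem hr)
    have h0 : 0 ≤ m := by omega
    have hle : ((pvColN di : Int)) ≤ m := pv_colN_le m di h0 hub
    have hge : m ≤ ((pvColN di : Int)) := by
      have := pv_colN_ub di r' hr'
      omega
    congr 1
    omega

theorem pvZZ_nil_of_all_nil : ∀ (l : List (List Int)), (∀ r ∈ l, r = []) → pvZZ l = [] := by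
  intro l
  induction l using pvZZ.induct with
  | case1 => intro _; rfl
  | case2 r => intro h; simpa [pvZZ] using h r (by simp)
  | case3 r1 r2 rest ih =>
    intro h
    have h1 := h r1 (by simp)
    have h2 := h r2 (by simp)
    rw [show pvZZ (r1 :: r2 :: rest) = r1 ++ r2.reverse ++ pvZZ rest from rfl,
      h1, h2, ih (fun r hr => h r (by simp [hr]))]
    rfl

theorem pvPad_length (m : Int) (r : List Int) (h : (r.length : Int) ≤ m) :
    (pvPad m r).length = m.toNat := by
  simp only [pvPad, List.length_append, PySem.List.pyRepeat_singleton, List.length_replicate]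
  omega

-- A in closed form: zigzag-flatten, erase the k leftmost zeros, subtract 1, dedupe
theorem pv_A_eq (di : List (List Int)) (h : di ≠ []) :
    zigzag di = PySem.List.dedup ((pvErase (pvK di) (pvF di)).map (fun x => x - 1)) := by
  simp only [zigzag]
  rw [PySem.List.foldl_prod_mk
    (f := fun acc i => acc ++ [((PySem.List.pyGetD di i []).length : Int)])
    (g := fun _ i => some i)]
  rw [pv_layer, pv_lastFold, pv_max_eq di h]
  simp only [Option.getD_some]
  have hrowpos : 0 < di.length := List.length_pos_of_ne_nil h
  have hlast : (PySem.List.pyRange 0 (di.length : Int) 1).getLast? = some ((di.length : Int) - 1) := by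
    have : (di.length : Int) = ((di.length : Int) - 1) + 1 := by ring
    rw [this, PySem.List.pyRange_one_succ_right (by omega)]
    simp
  rw [hlast]
  set m : Int := ((pvColN di : Int)) with hm
  have hfa : (fun x1 : List Int => x1 ++ PySem.List.pyRepeat [(0:Int)] (m - (x1.length : Int)))
      = pvPad m := rfl
  rw [hfa]
  set a := di.map (pvPad m) with ha
  have hrow : di.length = a.length := (List.length_map ..).symm
  by_cases hm0 : pvColN di = 0
  · -- all rows are empty: the while loop appends nothing
    have hmz : m = 0 := by rw [hm, hm0]; rfl
    have hanil : ∀ p ∈ a, p = [] := by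
      intro p hp
      obtain ⟨r, hr, rfl⟩ := List.mem_map.1 hp
      have hr0 : r = [] := by
        have := pv_colN_ub di r hr
        rw [hm0] at this
        exact List.eq_nil_of_length_eq_zero (by omega)
      simp [pvPad, hr0, hmz, PySem.List.pyRepeat_singleton]
    rw [hmz, pv_while_col0 a di.length (di.length - 0) 0 1 [] _ rfl]
    have hF : pvF di = [] := by
      apply pvZZ_nil_of_all_nil
      intro r hr
      exact hanil r hr
    show PySem.List.dedup ((zigzagRm [] ((di.length : Int) - 1).toNat).map (fun x => x - 1)) = _
    rw [zigzagRm]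
    simp only [List.length_nil, Nat.not_lt_zero, dif_neg, not_false_eq_true, List.map_nil]
    rw [hF, pvErase_nil]
    rfl
  · have hm1 : 1 ≤ m := by
      rw [hm]; omega
    have hlen : ∀ p ∈ a, (p.length : Int) = m := by
      intro p hp
      obtain ⟨r, hr, rfl⟩ := List.mem_map.1 hp
      have hub : (r.length : Int) ≤ m := by
        have := pv_colN_ub di r hr
        rw [hm]; omega
      rw [pvPad_length m r hub]
      omega
    have hW := pv_whileA a m hm1 hlen (a.length - 0) 0 rfl []
      (some ((di.length : Int) - 1))
    rw [← hrow] at hW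
    rw [if_pos hrowpos] at hW
    have h01 : 0 + 1 = 1 := rfl
    rw [h01] at hW
    have hiv : (if (di.length - 0) % 2 = 0 then (0:Int) else m - 1).toNat = pvI0 di := by
      by_cases hp : di.length % 2 = 0
      · simp [pvI0, hp]
      · simp only [pvI0, Nat.sub_zero, if_neg hp]
        rw [hm]
        omega
    simp only [Option.some_or]
    rw [hW]
    simp only [List.drop_zero, List.nil_append]
    show PySem.List.dedup ((zigzagRm (pvZZ a)
        (if (di.length - 0) % 2 = 0 then (0:Int) else m - 1).toNat).map (fun x => x - 1)) = _
    rw [pv_rm_spec, hiv]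
    rfl

-- B in closed form: zigzag-flatten, drop all zeros, subtract 1, dedupe
theorem pv_B_eq (di : List (List Int)) (h : di ≠ []) :
    zigzag_alt di = PySem.List.dedup (((pvF di).filter (fun x => decide (x ≠ 0))).map (fun x => x - 1)) := by
  simp only [zigzag_alt]
  rw [pv_max_eq di h]
  simp only [Option.getD_some]
  have hfl : (fun (acc : List Int) (p : List Int × Nat) =>
      acc ++ (if p.2 % 2 = 0
        then p.1 ++ PySem.List.pyRepeat [(0:Int)] (((pvColN di : Int)) - (p.1.length : Int))
        else (p.1 ++ PySem.List.pyRepeat [(0:Int)] (((pvColN di : Int)) - (p.1.length : Int))).reverse))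
      = (fun (acc : List Int) (p : List Int × Nat) =>
      acc ++ (if p.2 % 2 = 0 then pvPad ((pvColN di : Int)) p.1 else (pvPad ((pvColN di : Int)) p.1).reverse)) := rfl
  rw [hfl, pv_foldB_flat (pvPad ((pvColN di : Int))) di 0 rfl [], List.nil_append]
  have hempty : (PySem.Set.empty : PySem.Set Int) = [] := rfl
  rw [hempty, pv_foldB (pvZZ (di.map (pvPad ((pvColN di : Int))))) []]
  rw [PySem.List.dedup_eq_ofList, PySem.Set.ofList_eq_foldl]
  rfl

theorem pvZZ_cons (p0 : List Int) (l : List (List Int)) :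
    ∃ s, pvZZ (p0 :: l) = p0 ++ s := by
  cases l with
  | nil => exact ⟨[], by simp [pvZZ]⟩
  | cons p1 rest =>
    exact ⟨p1.reverse ++ pvZZ rest, by simp [pvZZ, List.append_assoc]⟩

theorem pv_take_F (r0 : List Int) (t : List (List Int)) (n : Nat)
    (hn : n ≤ pvColN (r0 :: t)) :
    (pvF (r0 :: t)).take n = (pvPad ((pvColN (r0 :: t) : Int)) r0).take n := by
  obtain ⟨s, hs⟩ := pvZZ_cons (pvPad ((pvColN (r0 :: t) : Int)) r0) (t.map (pvPad ((pvColN (r0 :: t) : Int))))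
  have hF : pvF (r0 :: t) = pvPad ((pvColN (r0 :: t) : Int)) r0 ++ s := by
    simpa [pvF] using hs
  rw [hF, List.take_append_of_le_length]
  rw [pvPad_length]
  · omega
  · exact_mod_cast pv_colN_ub (r0 :: t) r0 (by simp)

theorem pv_take_pad (r0 : List Int) (c : Nat) (hub : r0.length ≤ c) (n : Nat) :
    (pvPad (c : Int) r0).take n
      = r0.take n ++ (List.replicate (c - r0.length) (0:Int)).take (n - r0.length) := by
  have hrep : PySem.List.pyRepeat [(0:Int)] ((c : Int) - (r0.length : Int))
      = List.replicate (c - r0.length) (0:Int) := by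
    rw [PySem.List.pyRepeat_singleton]
    congr 1
    omega
  rw [pvPad, hrep, List.take_append]

theorem pv_zero_take (di : List (List Int)) (hne : di ≠ []) (hd : D_zigzag di) :
    (0:Int) ∈ (pvF di).take (pvColN di - 1) := by
  obtain ⟨r0, t, rfl⟩ : ∃ r0 t, di = r0 :: t := by
    cases di with
    | nil => exact absurd rfl hne
    | cons x l => exact ⟨x, l, rfl⟩
  have hub : r0.length ≤ pvColN (r0 :: t) := pv_colN_ub _ r0 (by simp)
  rw [pv_take_F r0 t (pvColN (r0 :: t) - 1) (by omega), pv_take_pad r0 _ hub]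
  rcases hd.2 with hmem | hlt
  · exact List.mem_append.2 (Or.inl (by simpa using hmem))
  · refine List.mem_append.2 (Or.inr ?_)
    rw [List.take_replicate]
    refine List.mem_replicate.2 ⟨?_, rfl⟩
    have hlt' : r0.length + 1 < pvColN (r0 :: t) := by simpa using hlt
    omega

theorem pv_k_total (di : List (List Int)) (hne : di ≠ []) (hnd : ¬ D_zigzag di) :
    pvK di = (pvF di).count 0 := by
  unfold pvK pvI0
  by_cases hp : di.length % 2 = 0
  · rw [if_pos hp, List.drop_zero]
  · rw [if_neg hp]
    have hodd : di.length % 2 = 1 := by omega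
    obtain ⟨r0, t, rfl⟩ : ∃ r0 t, di = r0 :: t := by
      cases di with
      | nil => exact absurd rfl hne
      | cons x l => exact ⟨x, l, rfl⟩
    have hnd2 : ¬((0:Int) ∈ ((r0 :: t).headD []).take (pvColN (r0 :: t) - 1)
        ∨ ((r0 :: t).headD []).length + 1 < pvColN (r0 :: t)) := fun hx => hnd ⟨hodd, hx⟩
    rw [not_or] at hnd2
    obtain ⟨hmem, hge⟩ := hnd2
    have hmem' : (0:Int) ∉ r0.take (pvColN (r0 :: t) - 1) := by simpa using hmem
    have hge' : pvColN (r0 :: t) ≤ r0.length + 1 := by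
      simp only [List.headD_cons] at hge
      omega
    conv_rhs => rw [← List.take_append_drop (pvColN (r0 :: t) - 1) (pvF (r0 :: t))]
    rw [List.count_append]
    have hub : r0.length ≤ pvColN (r0 :: t) := pv_colN_ub _ r0 (by simp)
    have h0 : ((pvF (r0 :: t)).take (pvColN (r0 :: t) - 1)).count 0 = 0 := by
      apply List.count_eq_zero_of_not_mem
      rw [pv_take_F r0 t (pvColN (r0 :: t) - 1) (by omega), pv_take_pad r0 _ hub]
      intro hmem2
      rcases List.mem_append.1 hmem2 with h1 | h1
      · exact hmem' h1
      · rw [List.take_replicate] at h1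
        have := (List.mem_replicate.1 h1).1
        omega
    omega

-- ===== VERDICT =====
theorem zigzag_spec : Claim_unchanged_zigzag := by
  intro di _hdom hpre hnd
  rw [pv_A_eq di hpre, pv_B_eq di hpre, pv_k_total di hpre hnd, pvErase_all]

theorem zigzag_changed : Claim_changed_zigzag := by
  unfold Claim_changed_zigzag
  refine ⟨by decide, by decide, by decide, ?_, by decide, by decide⟩
  rw [pv_A_eq pvDiffWitness_zigzag (by decide)]
  decide

theorem zigzag_tight : Claim_exact_zigzag := by
  intro di _hdom hpre hd
  rw [pv_A_eq di hpre, pv_B_eq di hpre]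
  intro heq
  have hKdef : pvK di = ((pvF di).drop (pvColN di - 1)).count 0 := by
    unfold pvK pvI0
    rw [if_neg (by have := hd.1; omega)]
  have hk : pvK di ≤ (pvF di).count 0 := by
    rw [hKdef]
    exact ((pvF di).drop_sublist _).count_le 0
  have htake : (0:Int) ∈ (pvF di).take (pvColN di - 1) := pv_zero_take di hpre hd
  have hz0 : 0 < ((pvF di).take (pvColN di - 1)).count 0 := List.count_pos_iff.2 htake
  have hsum : (pvF di).count 0
      = ((pvF di).take (pvColN di - 1)).count 0 + pvK di := by
    conv_lhs => rw [← List.take_append_drop (pvColN di - 1) (pvF di)]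
    rw [List.count_append, hKdef]
  have hcnt := pvErase_count (pvK di) (pvF di) hk
  have hmemA : (0:Int) ∈ pvErase (pvK di) (pvF di) :=
    List.count_pos_iff.1 (by omega)
  have hA : (-1:Int) ∈ PySem.List.dedup ((pvErase (pvK di) (pvF di)).map (fun x => x - 1)) := by
    rw [PySem.List.mem_dedup]
    exact List.mem_map.2 ⟨0, hmemA, by norm_num⟩
  rw [heq, PySem.List.mem_dedup] at hA
  obtain ⟨x, hxf, hx1⟩ := List.mem_map.1 hA
  have hx0 : x = 0 := by omega
  have hxne := List.of_mem_filter hxf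
  rw [hx0] at hxne
  simp at hxne
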